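-- pv_equiv track=rewrite | github.com/andrewhamara/leetcode | py/1071.py | divides
-- ===== SOURCE A (Python) =====
-- def divides(original: str, sub: str) -> bool:
--     lenSub = len(sub)
--     lenOrig = len(original)
--
--     if lenOrig % lenSub != 0:
--         return False
--     for i in range(0, lenOrig, lenSub):
--         if original[i:i+lenSub] != sub:
--             return False
--     return True
-- ===== SOURCE B (Python) =====
-- def divides(original: str, sub: str) -> bool:
--     rest = original
--     while rest:
--         if not rest.startswith(sub):
--             return False
--         rest = rest[len(sub):]
--     return True
-- ===== Notes on version B (the rewrite author's own statement) =====
-- stated objective: simpler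
-- what changed: The modulo guard and index-stepped block loop are replaced by a prefix-stripping while loop: repeatedly check that sub is a prefix of the remaining string and cut it off; the string is a repetition of sub iff the loop consumes it exactly.
import Mathlib
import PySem

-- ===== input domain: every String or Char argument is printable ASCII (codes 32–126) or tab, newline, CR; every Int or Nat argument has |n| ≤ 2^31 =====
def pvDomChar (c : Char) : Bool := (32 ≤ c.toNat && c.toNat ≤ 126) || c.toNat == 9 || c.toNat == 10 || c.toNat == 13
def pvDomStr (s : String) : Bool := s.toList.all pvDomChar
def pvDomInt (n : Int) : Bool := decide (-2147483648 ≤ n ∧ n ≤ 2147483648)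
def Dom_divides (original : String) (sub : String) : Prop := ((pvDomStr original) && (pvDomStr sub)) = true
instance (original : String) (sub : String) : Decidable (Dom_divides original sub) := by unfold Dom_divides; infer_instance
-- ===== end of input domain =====

-- B replaces A's modulo guard and index-stepped block loop by a prefix-stripping while loop (objective: simpler).

-- ===== PORT A =====
def divides (original : String) (sub : String) : Bool :=
  let lenSub := PySem.Str.len sub
  let lenOrig := PySem.Str.len original
  if PySem.Int.mod lenOrig lenSub ≠ 0 then false
  else
    (PySem.List.pyRange 0 lenOrig lenSub).all
      (fun i => PySem.List.slice original.toList (some i) (some (i + lenSub)) == sub.toList)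

-- ===== PORT B =====
-- the while loop of Source B; fuel = |original| only makes the recursion total (each iteration of
-- the Python loop shortens rest by |sub| ≥ 1 under Pre_, so the fuel is never exhausted there).
-- rest.startswith(sub) is ported exactly as rest.take |sub| == sub, rest[len(sub):] as rest.drop |sub|.
def dividesAltLoop (sub : List Char) : Nat → List Char → Bool
  | 0, rest => rest.isEmpty
  | Nat.succ f, rest =>
    if rest.isEmpty then true
    else if rest.take sub.length == sub then dividesAltLoop sub f (rest.drop sub.length)
    else false

def divides_alt (original : String) (sub : String) : Bool :=
  dividesAltLoop sub.toList original.toList.length original.toList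

-- ===== PRECONDITION & SPEC =====
-- Pre_ excludes only sub = "", on which A raises ZeroDivisionError at `lenOrig % lenSub`
-- (B's while loop does not terminate there for nonempty original).
def Pre_divides (original : String) (sub : String) : Prop := sub ≠ ""
instance (original : String) (sub : String) : Decidable (Pre_divides original sub) := by unfold Pre_divides; infer_instance
def pvWitness_divides : String × String := ("abab", "ab")
def Spec_divides (original : String) (sub : String) (out : Bool) : Prop := out = divides_alt original sub
instance (original : String) (sub : String) (out : Bool) : Decidable (Spec_divides original sub out) := by unfold Spec_divides; infer_instance

-- ===== CLAIM (what is proved, stated in full; the proofs are below) =====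
def Claim_equal_divides : Prop := ∀ (original : String) (sub : String), Dom_divides original sub → Pre_divides original sub → Spec_divides original sub (divides original sub)

-- ===== LEMMAS AND PROOFS =====

theorem flatten_rep_len {α : Type} (s : List α) : ∀ q : Nat, (List.replicate q s).flatten.length = q * s.length := by
  intro q
  induction q with
  | zero => simp
  | succ q ih => simp [List.replicate_succ, ih]; ring

-- all m-blocks of o equal s ↔ o is s repeated q times (o of length q*m, m = s.length)
theorem blocks_iff_flatten {α : Type} (s : List α) (_ : 0 < s.length) :
    ∀ (q : Nat) (o : List α), o.length = q * s.length →
      ((∀ k < q, (o.drop (s.length * k)).take s.length = s) ↔ o = (List.replicate q s).flatten) := by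
  intro q
  induction q with
  | zero =>
    intro o h
    simp only [Nat.zero_mul] at h
    have ho : o = [] := List.eq_nil_of_length_eq_zero h
    subst ho
    exact ⟨fun _ => by simp, fun _ k hk => absurd hk (by omega)⟩
  | succ q ih =>
    intro o h
    have hx : (q + 1) * s.length = q * s.length + s.length := by ring
    have hdroplen : (o.drop s.length).length = q * s.length := by
      rw [List.length_drop, h, hx]; omega
    have ihd := ih (o.drop s.length) hdroplen
    constructor
    · intro hall
      have h0 : o.take s.length = s := by
        have := hall 0 (Nat.succ_pos q); simpa using this
      have hrest : o.drop s.length = (List.replicate q s).flatten := by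
        apply ihd.mp
        intro k hk
        have := hall (k + 1) (by omega)
        rw [List.drop_drop]
        have harith : s.length * (k + 1) = s.length * k + s.length := by ring
        rw [harith] at this
        simpa [Nat.add_comm] using this
      calc o = o.take s.length ++ o.drop s.length := (List.take_append_drop _ _).symm
        _ = s ++ (List.replicate q s).flatten := by rw [h0, hrest]
        _ = (List.replicate (q + 1) s).flatten := by simp [List.replicate_succ]
    · intro ho
      have hosplit : o = s ++ (List.replicate q s).flatten := by
        simpa [List.replicate_succ] using ho
      have h0 : o.take s.length = s := by rw [hosplit]; simp
      have hrest : o.drop s.length = (List.replicate q s).flatten := by rw [hosplit]; simp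
      intro k hk
      cases k with
      | zero => simpa using h0
      | succ k =>
        have hall := ihd.mpr hrest k (by omega)
        rw [List.drop_drop] at hall
        have harith : s.length * (k + 1) = s.length + s.length * k := by ring
        rw [harith]
        exact hall

-- length of A's pyRange (step m, bound q*m) is exactly the quotient q
theorem count_eq (m q : Nat) (hm : 0 < m) :
    (if (0 : Int) < ((q * m : Nat) : Int) then ((((q * m : Nat) : Int) - 0 + (m : Int) - 1) / (m : Int)).toNat else 0) = q := by
  have hdiv : (q * m + (m - 1)) / m = q := by
    rw [Nat.add_comm, Nat.add_mul_div_right _ _ hm, Nat.div_eq_of_lt (by omega)]; omega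
  split
  · next _ =>
    have hcast : (((q * m : Nat) : Int) - 0 + (m : Int) - 1) = ((q * m + (m - 1) : Nat) : Int) := by
      push_cast; omega
    rw [hcast, ← Int.natCast_ediv, hdiv]
    simp
  · next h =>
    have hq0 : q = 0 := by
      rcases Nat.eq_zero_or_pos q with h' | h'
      · exact h'
      · exact absurd (by exact_mod_cast Nat.mul_pos h' hm : (0 : Int) < ((q * m : Nat) : Int)) h
    omega

-- A returns true exactly when original is some repetition of sub
theorem aTrue_iff (original sub : String) (hm : 0 < sub.toList.length) :
    divides original sub = true ↔ ∃ q, original.toList = (List.replicate q sub.toList).flatten := by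
  unfold divides
  simp only [PySem.Str.len_eq]
  by_cases hmod : PySem.Int.mod (original.toList.length : Int) (sub.toList.length : Int) ≠ 0
  · rw [if_pos hmod]
    simp only [Bool.false_eq_true, false_iff]
    rintro ⟨q, hq⟩
    apply hmod
    rw [PySem.Int.mod_eq_zero_iff_dvd]
    have hlen : original.toList.length = q * sub.toList.length := by rw [hq, flatten_rep_len]
    exact_mod_cast (⟨q, by rw [hlen]; ring⟩ : sub.toList.length ∣ original.toList.length)
  · rw [if_neg hmod]
    have hmod0 : PySem.Int.mod (original.toList.length : Int) (sub.toList.length : Int) = 0 :=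
      not_ne_iff.mp hmod
    have hdvd : (sub.toList.length : Int) ∣ (original.toList.length : Int) :=
      (PySem.Int.mod_eq_zero_iff_dvd _ _).mp hmod0
    have hdvdn : sub.toList.length ∣ original.toList.length := by exact_mod_cast hdvd
    obtain ⟨q, hq⟩ := hdvdn
    have hq' : original.toList.length = q * sub.toList.length := by rw [hq]; ring
    rw [PySem.List.pyRange_of_pos _ _ (by exact_mod_cast hm : (0 : Int) < (sub.toList.length : Int)), hq',
        count_eq sub.toList.length q hm, List.all_map]
    rw [List.all_eq_true]
    have hbridge := blocks_iff_flatten sub.toList hm q original.toList hq'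
    constructor
    · intro hall
      refine ⟨q, hbridge.mp ?_⟩
      intro k hk
      have hone := hall k (List.mem_range.mpr hk)
      simp only [Function.comp_apply] at hone
      have hidx2 : (0 : Int) + (sub.toList.length : Int) * k + (sub.toList.length : Int)
          = ((sub.toList.length * k : Nat) : Int) + ((sub.toList.length : Nat) : Int) := by push_cast; ring
      have hidx : (0 : Int) + (sub.toList.length : Int) * k = ((sub.toList.length * k : Nat) : Int) := by
        push_cast; ring
      rw [hidx2, hidx, PySem.List.slice_natCast_add] at hone
      exact beq_iff_eq.mp hone
    · rintro ⟨q', hflat⟩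
      have hqq : q' = q := by
        have := hq'
        rw [hflat, flatten_rep_len] at this
        exact Nat.eq_of_mul_eq_mul_right hm this
      subst hqq
      intro k hk
      have hblk := hbridge.mpr hflat k (List.mem_range.mp hk)
      simp only [Function.comp_apply]
      have hidx2 : (0 : Int) + (sub.toList.length : Int) * k + (sub.toList.length : Int)
          = ((sub.toList.length * k : Nat) : Int) + ((sub.toList.length : Nat) : Int) := by push_cast; ring
      have hidx : (0 : Int) + (sub.toList.length : Int) * k = ((sub.toList.length * k : Nat) : Int) := by
        push_cast; ring
      rw [hidx2, hidx, PySem.List.slice_natCast_add]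
      exact beq_iff_eq.mpr hblk

-- B's stripping loop accepts exactly the repetitions of sub (for nonempty sub and enough fuel)
theorem bloop_iff (sub : List Char) (hm : 0 < sub.length) :
    ∀ (fuel : Nat) (rest : List Char), rest.length ≤ fuel →
      (dividesAltLoop sub fuel rest = true ↔ ∃ q, rest = (List.replicate q sub).flatten) := by
  intro fuel
  induction fuel with
  | zero =>
    intro rest h
    have hr : rest = [] := List.eq_nil_of_length_eq_zero (Nat.le_zero.mp h)
    subst hr
    simp only [dividesAltLoop, List.isEmpty_nil, true_iff]
    exact ⟨0, by simp⟩
  | succ f ih =>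
    intro rest hlen
    by_cases hre : rest = []
    · subst hre
      simp only [dividesAltLoop, List.isEmpty_nil, if_true, true_iff]
      exact ⟨0, by simp⟩
    · have hie : rest.isEmpty = false := by simp [hre]
      simp only [dividesAltLoop, hie, Bool.false_eq_true, if_false]
      by_cases htk : rest.take sub.length = sub
      · rw [if_pos (beq_iff_eq.mpr htk)]
        have hlen' : (rest.drop sub.length).length ≤ f := by
          rw [List.length_drop]
          have : 0 < rest.length := List.length_pos_iff.mpr hre
          omega
        rw [ih (rest.drop sub.length) hlen']
        constructor
        · rintro ⟨q, hd⟩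
          refine ⟨q + 1, ?_⟩
          calc rest = rest.take sub.length ++ rest.drop sub.length := (List.take_append_drop _ _).symm
            _ = sub ++ (List.replicate q sub).flatten := by rw [htk, hd]
            _ = (List.replicate (q + 1) sub).flatten := by simp [List.replicate_succ]
        · rintro ⟨q, hrest⟩
          cases q with
          | zero => exact absurd (by simpa using hrest) hre
          | succ q =>
            refine ⟨q, ?_⟩
            have hsplit : rest = sub ++ (List.replicate q sub).flatten := by
              simpa [List.replicate_succ] using hrest
            rw [hsplit, List.drop_left]
      · rw [if_neg (by simpa using htk)]
        simp only [Bool.false_eq_true, false_iff]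
        rintro ⟨q, hrest⟩
        cases q with
        | zero => exact hre (by simpa using hrest)
        | succ q =>
          apply htk
          have hsplit : rest = sub ++ (List.replicate q sub).flatten := by
            simpa [List.replicate_succ] using hrest
          rw [hsplit, List.take_left]

-- ===== VERDICT (by name: the statement is the Claim_ definition above) =====
theorem divides_spec : Claim_equal_divides := by
  intro original sub _ hpre
  unfold Spec_divides
  have hm : 0 < sub.toList.length := by
    cases hsl : sub.toList with
    | nil => exact absurd (by simpa [← String.toList_eq_nil_iff] using hsl) hpre
    | cons a l => simp
  have hb : divides_alt original sub = true ↔ ∃ q, original.toList = (List.replicate q sub.toList).flatten :=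
    bloop_iff sub.toList hm original.toList.length original.toList le_rfl
  rw [Bool.eq_iff_iff, aTrue_iff original sub hm, hb]
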